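-- pv_equiv track=rewrite | github.com/TomRiddle01/EulerSolutions | solutions/12_only_lucas.py | divisorCount
-- ===== SOURCE A (Python) =====
-- def divisorCount(primes):
--     a = {}
--     for p in primes:
--         if p in a:
--             a[p] += 1
--         else:
--             a[p] = 2
--     r = 1
--     for k,i in a.items():
--         r *= i
--     return r
-- ===== SOURCE B (Python) =====
-- def divisorCount(primes):
--     ps = sorted(primes)
--     result = 1
--     run = 0
--     prev = None
--     for p in ps:
--         if run and p == prev:
--             run += 1
--         else:
--             result *= run + 1
--             run = 1
--             prev = p
--     return result * (run + 1)
-- ===== Notes on version B (the rewrite author's own statement) =====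
-- stated objective: alternative
-- what changed: Replaced the dict-based multiplicity counting with sort-then-single-pass run-length scan: sort the primes, walk once tracking current run length, multiply a running product by (run+1) at each value change.
import Mathlib
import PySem

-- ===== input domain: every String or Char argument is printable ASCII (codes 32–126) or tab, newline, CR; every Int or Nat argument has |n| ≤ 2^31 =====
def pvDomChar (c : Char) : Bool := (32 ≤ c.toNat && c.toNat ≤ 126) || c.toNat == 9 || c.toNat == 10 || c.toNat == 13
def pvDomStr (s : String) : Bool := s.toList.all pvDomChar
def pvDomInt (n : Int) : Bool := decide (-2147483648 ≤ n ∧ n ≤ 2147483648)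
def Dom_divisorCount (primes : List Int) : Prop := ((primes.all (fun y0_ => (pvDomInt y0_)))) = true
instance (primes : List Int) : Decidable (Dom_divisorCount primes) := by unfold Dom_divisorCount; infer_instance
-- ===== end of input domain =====

-- B replaces A's dict-based multiplicity counting by a sort-then-single-run-length-scan (alternative algorithm, same result).

-- ===== PORT A =====
def divisorCount (primes : List Int) : Int :=
  let a := primes.foldl (fun (a : PySem.Dict Int Int) p =>
      if a.contains p then a.insert p (a.getD p 0 + 1) else a.insert p 2) PySem.Dict.empty
  a.items.foldl (fun r kv => r * kv.2) 1

-- ===== PORT B =====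
def divisorCount_alt (primes : List Int) : Int :=
  let ps := PySem.List.sorted primes (fun x => x) false
  let s := ps.foldl (fun (s : Int × Int × Option Int) p =>
      if s.2.1 ≠ 0 ∧ s.2.2 = some p then (s.1, s.2.1 + 1, s.2.2)
      else (s.1 * (s.2.1 + 1), 1, some p)) ((1 : Int), (0 : Int), (none : Option Int))
  s.1 * (s.2.1 + 1)

-- ===== PRECONDITION & SPEC =====
def Spec_divisorCount (primes : List Int) (out : Int) : Prop := out = divisorCount_alt primes
instance (primes : List Int) (out : Int) : Decidable (Spec_divisorCount primes out) := by unfold Spec_divisorCount; infer_instance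

-- ===== CLAIM (what is proved, stated in full; the proofs are below) =====
def Claim_equal_divisorCount : Prop := ∀ (primes : List Int), Dom_divisorCount primes → Spec_divisorCount primes (divisorCount primes)

-- ===== LEMMAS AND PROOFS =====

-- canonical value: product of (multiplicity + 1) over the distinct elements
def pvP (l : List Int) : Int := l.toFinset.prod (fun k => (l.count k : Int) + 1)

lemma pvP_nil : pvP [] = 1 := by simp [pvP]

lemma pvP_perm {l l' : List Int} (h : l.Perm l') : pvP l = pvP l' := by
  unfold pvP
  rw [List.toFinset_eq_of_perm _ _ h]
  exact Finset.prod_congr rfl (fun k _ => by rw [h.count_eq])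

lemma pvP_cons (y : Int) (u : List Int) :
    pvP (y :: u) = ((u.count y : Int) + 2) * pvP (u.filter (fun z => z ≠ y)) := by
  unfold pvP
  have hy : y ∈ (y :: u).toFinset := by simp
  rw [← Finset.mul_prod_erase _ _ hy]
  have hset : (y :: u).toFinset.erase y = (u.filter (fun z => z ≠ y)).toFinset := by
    ext k
    simp only [Finset.mem_erase, List.mem_toFinset, List.mem_cons, List.mem_filter,
      decide_eq_true_eq]
    constructor
    · rintro ⟨hk, h | h⟩
      · exact absurd h hk
      · exact ⟨h, hk⟩
    · rintro ⟨hk, hne⟩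
      exact ⟨hne, Or.inr hk⟩
  rw [hset]
  congr 1
  · rw [List.count_cons_self]; push_cast; ring
  · apply Finset.prod_congr rfl
    intro k hk
    have hk' : k ∈ u ∧ k ≠ y := by
      have := List.mem_toFinset.mp hk
      simpa using this
    rw [List.count_cons_of_ne (Ne.symm hk'.2),
      List.count_filter (by simp [hk'.2])]

-- ===== A-side =====

lemma a_body_eq (l : List Int) (d : PySem.Dict Int Int) :
    l.foldl (fun (a : PySem.Dict Int Int) p =>
      if a.contains p then a.insert p (a.getD p 0 + 1) else a.insert p 2) d
    = l.foldl (fun (a : PySem.Dict Int Int) p => a.insert p (a.getD p 1 + 1)) d := by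
  apply PySem.List.foldl_congr_mem
  intro a p _
  by_cases h : a.contains p = true
  · have hs : (a.get? p).isSome := by rw [← PySem.Dict.contains_eq_isSome_get?]; exact h
    obtain ⟨v, hv⟩ := Option.isSome_iff_exists.mp hs
    simp [h, PySem.Dict.getD_eq_get?_getD, hv]
  · have h' : a.contains p = false := by simpa using h
    rw [if_neg (by simp [h']), PySem.Dict.getD_of_not_contains _ _ h']
    norm_num

lemma a_loop_getD (l : List Int) (d : PySem.Dict Int Int) (v : Int) :
    (l.foldl (fun (a : PySem.Dict Int Int) p => a.insert p (a.getD p 1 + 1)) d).getD v 1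
      = d.getD v 1 + l.count v := by
  induction l generalizing d with
  | nil => simp
  | cons x t ih =>
    rw [List.foldl_cons, ih, PySem.Dict.getD_insert, List.count_cons]
    by_cases hvx : v = x
    · rw [if_pos hvx, hvx]; simp; ring
    · rw [if_neg hvx]; simp [Ne.symm hvx]

lemma foldl_mul_int (l : List Int) (f : Int → Int) (a : Int) :
    l.foldl (fun r x => r * f x) a = a * (l.map f).prod := by
  induction l generalizing a with
  | nil => simp
  | cons x t ih => simp [List.foldl_cons, ih, mul_assoc]

lemma a_value (primes : List Int) : divisorCount primes = pvP primes := by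
  unfold divisorCount
  show List.foldl (fun r kv => r * kv.2) 1
    (primes.foldl (fun (a : PySem.Dict Int Int) p =>
      if a.contains p then a.insert p (a.getD p 0 + 1) else a.insert p 2)
      PySem.Dict.empty).items = pvP primes
  rw [a_body_eq]
  set d := primes.foldl (fun (a : PySem.Dict Int Int) p => a.insert p (a.getD p 1 + 1))
    PySem.Dict.empty with hd
  have hkeys : d.keys = PySem.Set.ofList primes := by
    rw [hd, PySem.Dict.keys_foldl_insert, PySem.Dict.keys_empty]
    rfl
  have hnd : d.keys.Nodup := by
    rw [hd]; exact PySem.Dict.nodup_keys_foldl_insert _ _ _ PySem.Dict.nodup_keys_empty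
  have hgetD : ∀ v : Int, d.getD v 1 = 1 + primes.count v := by
    intro v; rw [hd, a_loop_getD]; simp
  rw [PySem.Dict.items_eq_map_keys d hnd 1, List.foldl_map, hkeys]
  have : (PySem.Set.ofList primes).foldl
      (fun r k => r * (k, d.getD k 1).2) 1
      = 1 * ((PySem.Set.ofList primes).map (fun k => d.getD k 1)).prod :=
    foldl_mul_int _ _ 1
  rw [this, one_mul, ← List.prod_toFinset _ (PySem.Set.nodup_ofList primes)]
  have hfs : (PySem.Set.ofList primes).toFinset = primes.toFinset := by
    ext k; simp [PySem.Set.mem_ofList]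
  rw [hfs]
  unfold pvP
  exact Finset.prod_congr rfl (fun k _ => by rw [hgetD]; ring)

-- ===== B-side =====

def pvStep (s : Int × Int × Option Int) (p : Int) : Int × Int × Option Int :=
  if s.2.1 ≠ 0 ∧ s.2.2 = some p then (s.1, s.2.1 + 1, s.2.2)
  else (s.1 * (s.2.1 + 1), 1, some p)

lemma b_scan (t : List Int) (x r run : Int) (hrun : 1 ≤ run)
    (hs : t.Pairwise (· ≤ ·)) (hx : ∀ y ∈ t, x ≤ y) :
    (t.foldl pvStep (r, run, some x)).1 * ((t.foldl pvStep (r, run, some x)).2.1 + 1)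
      = r * (run + (t.count x : Int) + 1) * pvP (t.filter (fun z => z ≠ x)) := by
  induction t generalizing x r run with
  | nil => simp [pvP_nil]
  | cons y t' ih =>
    rw [List.pairwise_cons] at hs
    by_cases hxy : x = y
    · subst hxy
      have hstep : pvStep (r, run, some x) x = (r, run + 1, some x) := by
        have hr : run ≠ 0 := by omega
        simp [pvStep, hr]
      rw [List.foldl_cons, hstep, ih x r (run + 1) (by omega) hs.2 hs.1]
      rw [List.count_cons_self]
      have hfilt : (x :: t').filter (fun z => z ≠ x) = t'.filter (fun z => z ≠ x) := by
        simp
      rw [hfilt]; push_cast; ring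
    · have hstep : pvStep (r, run, some x) y = (r * (run + 1), 1, some y) := by
        unfold pvStep
        rw [if_neg (by simp; intro _ h; exact hxy h)]
      rw [List.foldl_cons, hstep, ih y (r * (run + 1)) 1 le_rfl hs.2 hs.1]
      have hxlt : ∀ z ∈ t', x < z := by
        intro z hz
        have h1 : x ≤ y := hx y (List.mem_cons_self)
        have h2 : y ≤ z := hs.1 z hz
        omega
      have hcnt : t'.count x = 0 := by
        rw [List.count_eq_zero]
        intro hmem
        exact absurd rfl (ne_of_lt (hxlt x hmem))
      have hcnt2 : (y :: t').count x = 0 := by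
        rw [List.count_cons_of_ne (fun h => hxy h.symm), hcnt]
      have hfilt : (y :: t').filter (fun z => z ≠ x) = y :: t' := by
        rw [List.filter_cons_of_pos (by simp; exact fun h => hxy h.symm)]
        congr 1
        apply List.filter_eq_self.mpr
        intro z hz
        simp
        exact fun h => absurd h.symm (ne_of_lt (hxlt z hz))
      rw [hcnt2, hfilt, pvP_cons]
      push_cast; ring

lemma b_run (l : List Int) (hpw : l.Pairwise (· ≤ ·)) :
    (l.foldl pvStep ((1 : Int), (0 : Int), (none : Option Int))).1
      * ((l.foldl pvStep ((1 : Int), (0 : Int), (none : Option Int))).2.1 + 1) = pvP l := by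
  cases l with
  | nil => simp [pvP_nil]
  | cons y t =>
    rw [List.pairwise_cons] at hpw
    have h0 : pvStep ((1 : Int), (0 : Int), (none : Option Int)) y = (1, 1, some y) := by
      simp [pvStep]
    rw [List.foldl_cons, h0,
      b_scan t y 1 1 le_rfl hpw.2 hpw.1, pvP_cons]
    ring

lemma b_value (primes : List Int) : divisorCount_alt primes = pvP primes := by
  unfold divisorCount_alt
  show (List.foldl pvStep ((1 : Int), (0 : Int), (none : Option Int))
      (PySem.List.sorted primes (fun x => x) false)).1
    * ((List.foldl pvStep ((1 : Int), (0 : Int), (none : Option Int))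
      (PySem.List.sorted primes (fun x => x) false)).2.1 + 1) = pvP primes
  rw [b_run _ (PySem.List.sorted_pairwise primes (fun x => x)),
    pvP_perm (PySem.List.sorted_perm primes (fun x => x) false)]

-- ===== VERDICT (by name: the statement is the Claim_ definition above) =====
theorem divisorCount_spec : Claim_equal_divisorCount := by
  intro primes _
  unfold Spec_divisorCount
  rw [a_value, b_value]
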